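-- pv_equiv track=rewrite | github.com/cvr-bhupalreddy/dsa-python-2025 | DSA/DP/DP_Stocks/2_6_Stocks.py | cooldown_space
-- ===== SOURCE A (Python) =====
-- def cooldown_space(prices):
--     n = len(prices)
--     ahead1 = ahead2 = 0
--     buy1 = sell1 = 0
--
--     for i in range(n-1, -1, -1):
--         cur_buy = max(-prices[i] + sell1, buy1)
--         cur_sell = max(prices[i] + ahead2, sell1)
--         ahead2 = sell1
--         sell1 = cur_sell
--         buy1 = cur_buy
--
--     return buy1
-- ===== SOURCE B (Python) =====
-- def cooldown_space(prices):
--     # Table of "max sum of non-adjacent elements" for each suffix, built back-to-front: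
--     # after the loop, robs[k] is that value for the last k elements (robs[0]=robs[1]=0 pad).
--     robs = [0, 0]
--     for x in reversed(prices):
--         robs.append(max(robs[-1], x + robs[-2]))
--     # Answer: best single "pay prices[i], then collect the table value of the suffix after i".
--     best = 0
--     for p, r in zip(prices, reversed(robs[1:-1])):
--         best = max(best, r - p)
--     return best
-- ===== Notes on version B (the rewrite author's own statement) =====
-- stated objective: alternative
-- what changed: A fuses everything into one backward index loop over three rolling scalars; B first materialises the table of suffix 'max non-adjacent sum' values in one pass over reversed(prices), then finds the answer in a second zip pass over prices against that table (table DP + scan instead of a fused O(1)-space state machine).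
import Mathlib
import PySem

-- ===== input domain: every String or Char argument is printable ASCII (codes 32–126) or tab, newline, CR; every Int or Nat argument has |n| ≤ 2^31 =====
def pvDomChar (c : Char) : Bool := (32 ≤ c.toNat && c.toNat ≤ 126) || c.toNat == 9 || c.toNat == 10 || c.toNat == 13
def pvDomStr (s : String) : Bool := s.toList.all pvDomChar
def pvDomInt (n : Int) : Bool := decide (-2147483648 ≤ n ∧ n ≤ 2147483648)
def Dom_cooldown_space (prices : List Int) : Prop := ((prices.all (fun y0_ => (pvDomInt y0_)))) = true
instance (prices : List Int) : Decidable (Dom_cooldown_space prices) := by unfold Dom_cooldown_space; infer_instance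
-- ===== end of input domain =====

-- B replaces A's fused backward three-scalar index loop by an explicit suffix DP table plus a zip scan
-- (same O(n) cost, different decomposition); return values proved equal on all inputs.

-- ===== PORT A =====
-- state = (ahead2, sell1, buy1); prices[i] read with pyGetD (i is always in range: 0 ≤ i < len)
def cooldown_space (prices : List Int) : Int :=
  ((PySem.List.pyRange ((prices.length : Int) - 1) (-1) (-1)).foldl
    (fun (st : Int × Int × Int) i =>
      let p := PySem.List.pyGetD prices i 0
      (st.2.1, max (p + st.1) st.2.1, max (-p + st.2.1) st.2.2))
    (0, 0, 0)).2.2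

-- ===== PORT B =====
-- robs[-1] / robs[-2] read with pyGetD (robs always has ≥ 2 elements)
def cooldown_space_alt (prices : List Int) : Int :=
  let robs := prices.reverse.foldl
    (fun (r : List Int) x =>
      r ++ [max (PySem.List.pyGetD r (-1) 0) (x + PySem.List.pyGetD r (-2) 0)])
    [0, 0]
  (prices.zip ((PySem.List.slice robs (some 1) (some (-1))).reverse)).foldl
    (fun best pr => max best (pr.2 - pr.1)) 0

-- ===== PRECONDITION & SPEC =====
def Spec_cooldown_space (prices : List Int) (out : Int) : Prop := out = cooldown_space_alt prices
instance (prices : List Int) (out : Int) : Decidable (Spec_cooldown_space prices out) := by unfold Spec_cooldown_space; infer_instance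

-- ===== CLAIM (what is proved, stated in full; the proofs are below) =====
def Claim_equal_cooldown_space : Prop := ∀ (prices : List Int), Dom_cooldown_space prices → Spec_cooldown_space prices (cooldown_space prices)

-- ===== LEMMAS AND PROOFS =====

-- canonical backward machine both programs reduce to (processes the REVERSED price list)
def pvK : Int → Int → Int → List Int → Int
  | _, _, b, [] => b
  | s1, s2, b, x :: xs => pvK (max (x + s2) s1) s1 (max (-x + s1) b) xs

-- successive suffix-table values appended by B's first loop
def pvJ : Int → Int → List Int → List Int
  | _, _, [] => []
  | s1, s2, x :: xs => max s1 (x + s2) :: pvJ (max s1 (x + s2)) s1 xs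

-- the table value BEFORE each step (what B's zip pairs against)
def pvP : Int → Int → List Int → List Int
  | _, _, [] => []
  | s1, s2, x :: xs => s1 :: pvP (max s1 (x + s2)) s1 xs

theorem pvA_fold (q : List Int) : ∀ s2 s1 b,
    (q.foldl (fun (st : Int × Int × Int) p =>
      (st.2.1, max (p + st.1) st.2.1, max (-p + st.2.1) st.2.2)) (s2, s1, b)).2.2
    = pvK s1 s2 b q := by
  induction q with
  | nil => intro s2 s1 b; rfl
  | cons x xs ih => intro s2 s1 b; simp [List.foldl, pvK, ih]

theorem pvDesc_fold (xs : List Int) (f : (Int × Int × Int) → Int → (Int × Int × Int))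
    (init : Int × Int × Int) :
    (PySem.List.pyRange ((xs.length : Int) - 1) (-1) (-1)).foldl
      (fun st i => f st (PySem.List.pyGetD xs i 0)) init
    = xs.reverse.foldl f init := by
  rw [PySem.List.pyRange_neg_one_eq_reverse,
      show (-1 : Int) + 1 = 0 by norm_num,
      show ((xs.length : Int) - 1) + 1 = (xs.length : Int) by ring,
      ← List.foldl_map, List.map_reverse, PySem.List.map_pyGetD_pyRange_zero']

theorem cooldown_space_eq_pvK (prices : List Int) :
    cooldown_space prices = pvK 0 0 0 prices.reverse := by
  unfold cooldown_space
  rw [pvDesc_fold prices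
    (fun st p => (st.2.1, max (p + st.1) st.2.1, max (-p + st.2.1) st.2.2)) (0, 0, 0)]
  exact pvA_fold prices.reverse 0 0 0

theorem pvB_robs (q : List Int) : ∀ (pre : List Int) s2 s1,
    q.foldl (fun (r : List Int) x =>
      r ++ [max (PySem.List.pyGetD r (-1) 0) (x + PySem.List.pyGetD r (-2) 0)])
      (pre ++ [s2, s1])
    = (pre ++ [s2, s1]) ++ pvJ s1 s2 q := by
  induction q with
  | nil => intro pre s2 s1; simp [pvJ]
  | cons x xs ih =>
      intro pre s2 s1
      simp only [List.foldl]
      rw [show pre ++ [s2, s1] = (pre ++ [s2]) ++ [s1] by simp,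
          PySem.List.pyGetD_neg_one_append_singleton]
      rw [show (pre ++ [s2]) ++ [s1] = pre ++ [s2, s1] by simp]
      have h2 : PySem.List.pyGetD (pre ++ [s2, s1]) (-2) 0 = s2 := by
        rw [PySem.List.pyGetD_neg_ofNat (pre ++ [s2, s1]) 2 0 (by omega) (by simp)]
        simp
      rw [h2,
          show (pre ++ [s2, s1]) ++ [max s1 (x + s2)] = (pre ++ [s2]) ++ [s1, max s1 (x + s2)] by simp,
          ih]
      simp [pvJ]

theorem pvP_eq_dropLast (q : List Int) : ∀ s1 s2,
    pvP s1 s2 q = (s1 :: pvJ s1 s2 q).dropLast := by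
  induction q with
  | nil => intro s1 s2; rfl
  | cons x xs ih => intro s1 s2; simp [pvP, pvJ, ih]

theorem pvP_length (q : List Int) : ∀ s1 s2, (pvP s1 s2 q).length = q.length := by
  induction q with
  | nil => intro s1 s2; rfl
  | cons x xs ih => intro s1 s2; simp [pvP, ih]

theorem pvJ_length (q : List Int) : ∀ s1 s2, (pvJ s1 s2 q).length = q.length := by
  induction q with
  | nil => intro s1 s2; rfl
  | cons x xs ih => intro s1 s2; simp [pvJ, ih]

theorem pvB_slice (q : List Int) :
    PySem.List.slice ((0 : Int) :: 0 :: pvJ 0 0 q) (some 1) (some (-1)) = pvP 0 0 q := by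
  rw [pvP_eq_dropLast, List.dropLast_eq_take]
  have h1 : PySem.List.clampIdx (q.length + 1 + 1) 1 = 1 := by
    simp [PySem.List.clampIdx]
  simp only [PySem.List.slice, PySem.List.clampIdx_neg_one, List.length_cons,
    pvJ_length, h1, List.drop_succ_cons, List.drop_zero]
  congr 1

theorem pvMaxFold_shift (f : Int × Int → Int) (l : List (Int × Int)) : ∀ b c,
    l.foldl (fun a x => max a (f x)) (max b c) = max (l.foldl (fun a x => max a (f x)) b) c := by
  induction l with
  | nil => intro b c; rfl
  | cons x xs ih =>
      intro b c
      simp only [List.foldl]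
      rw [show max (max b c) (f x) = max (max b (f x)) c by
        simp [max_assoc, max_comm c (f x)], ih]

theorem pvMaxFold_reverse (f : Int × Int → Int) (l : List (Int × Int)) : ∀ b,
    l.reverse.foldl (fun a x => max a (f x)) b = l.foldl (fun a x => max a (f x)) b := by
  induction l with
  | nil => intro b; rfl
  | cons x xs ih =>
      intro b
      simp only [List.reverse_cons, List.foldl_append, List.foldl, ih]
      rw [pvMaxFold_shift]

theorem pvB_zipfold (q : List Int) : ∀ s1 s2 b,
    (q.zip (pvP s1 s2 q)).foldl (fun best pr => max best (pr.2 - pr.1)) b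
    = pvK s1 s2 b q := by
  induction q with
  | nil => intro s1 s2 b; rfl
  | cons x xs ih =>
      intro s1 s2 b
      simp only [pvP, List.zip_cons_cons, List.foldl, pvK, ih]
      rw [show max b (s1 - x) = max (-x + s1) b by rw [max_comm]; ring_nf,
          max_comm s1 (x + s2)]

theorem pvZip_reverse (as : List Int) : ∀ (bs : List Int),
    as.length = bs.length → as.reverse.zip bs.reverse = (as.zip bs).reverse := by
  induction as with
  | nil =>
      intro bs h
      have : bs = [] := List.eq_nil_of_length_eq_zero h.symm
      simp [this]
  | cons x xs ih =>
      intro bs h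
      cases bs with
      | nil => simp at h
      | cons y ys =>
          simp only [List.reverse_cons]
          have hl : xs.length = ys.length := by simpa using h
          rw [List.zip_append (by simp [hl]), ih ys hl]
          simp

theorem cooldown_space_alt_eq_pvK (prices : List Int) :
    cooldown_space_alt prices = pvK 0 0 0 prices.reverse := by
  unfold cooldown_space_alt
  rw [show ([0, 0] : List Int) = [] ++ [0, 0] by simp, pvB_robs prices.reverse [] 0 0]
  simp only [List.nil_append]
  rw [show (([(0 : Int), 0]) ++ pvJ 0 0 prices.reverse) = (0 : Int) :: 0 :: pvJ 0 0 prices.reverse by simp,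
      pvB_slice]
  have hz := pvZip_reverse prices.reverse (pvP 0 0 prices.reverse) (by rw [pvP_length])
  rw [List.reverse_reverse] at hz
  rw [hz, pvMaxFold_reverse (fun pr => pr.2 - pr.1)]
  exact pvB_zipfold prices.reverse 0 0 0

-- ===== VERDICT (by name: the statement is the Claim_ definition above) =====
theorem cooldown_space_spec : Claim_equal_cooldown_space := by
  intro prices _
  unfold Spec_cooldown_space
  rw [cooldown_space_eq_pvK, cooldown_space_alt_eq_pvK]
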